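-- pv_equiv track=rewrite | github.com/jimclouse/normalorg | normalOrg/__init__.py | _collapseAbbrv
-- ===== SOURCE A (Python) =====
-- def _collapseAbbrv(_s):
--     """ helper method used to collapse abbreviations like "a b c" to "abc"
--         returns list of tokens for efficiency in normalize method
--     """
--     _t = ""
--     _a = []
--     for x in _s.split(" "):
--         if len(x) == 1:
--             _t = _t + x
--         else:
--             if len(_t) > 0:
--                 _a.append(_t)
--                 _t = ""
--             _a.append(x)
--     if len(_t) > 0:
--         _a.append(_t)
--     return _a
-- ===== SOURCE B (Python) =====
-- def _collapseAbbrv(_s):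
--     # same result as the original, but detects each run of single-char tokens
--     # as a whole and joins it, instead of a pending-accumulator with flush logic
--     toks = _s.split(" ")
--     n = len(toks)
--     out = []
--     i = 0
--     while i < n:
--         x = toks[i]
--         if len(x) != 1:
--             out.append(x)
--             i += 1
--         else:
--             run = []
--             while i < n and len(toks[i]) == 1:
--                 run.append(toks[i])
--                 i += 1
--             out.append("".join(run))
--     return out
-- ===== Notes on version B (the rewrite author's own statement) =====
-- stated objective: alternative
-- what changed: Replaces the pending-string accumulator with flush logic by a run-based scan: each maximal run of single-char tokens is located as a whole (inner scan) and joined once; other tokens are emitted directly.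
import Mathlib
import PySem

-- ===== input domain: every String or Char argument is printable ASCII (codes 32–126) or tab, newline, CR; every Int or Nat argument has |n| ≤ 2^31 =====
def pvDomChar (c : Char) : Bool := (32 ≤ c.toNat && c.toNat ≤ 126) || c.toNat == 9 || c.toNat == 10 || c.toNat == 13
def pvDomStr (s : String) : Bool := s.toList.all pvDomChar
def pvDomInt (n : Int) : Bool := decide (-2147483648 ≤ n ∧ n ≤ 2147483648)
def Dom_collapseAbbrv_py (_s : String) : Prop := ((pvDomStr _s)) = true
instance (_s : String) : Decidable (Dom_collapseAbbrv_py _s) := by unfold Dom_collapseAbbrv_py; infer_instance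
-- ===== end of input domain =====

-- B collapses each maximal run of single-char tokens via an inner span instead of A's pending accumulator with flush; same value everywhere (alternative decomposition, no speed claim).

-- ===== PORT A =====
def collapseAbbrv_py (_s : String) : List String :=
  let st := ((PySem.Str.split? _s " ").getD []).foldl
    (fun (p : String × List String) x =>
      if PySem.Str.len x == 1 then (p.1 ++ x, p.2)
      else if PySem.Str.len p.1 > 0 then ("", p.2 ++ [p.1] ++ [x])
      else (p.1, p.2 ++ [x]))
    ("", [])
  if PySem.Str.len st.1 > 0 then st.2 ++ [st.1] else st.2

-- ===== PORT B =====
-- inner while loop of B: collect the leading run of single-char tokens, return (run, rest)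
def collapseSpan : List String → List String × List String
  | [] => ([], [])
  | x :: xs =>
    if PySem.Str.len x == 1 then
      let p := collapseSpan xs
      (x :: p.1, p.2)
    else ([], x :: xs)

-- the rest returned by the span never grows (termination of the outer loop)
theorem collapseSpan_rest_le : ∀ (l : List String), (collapseSpan l).2.length ≤ l.length := by
  intro l
  induction l with
  | nil => simp [collapseSpan]
  | cons x xs ih =>
    simp only [collapseSpan]
    split
    · simpa using Nat.le_succ_of_le ih
    · simp

-- outer while loop of B over the remaining tokens, with the output accumulator
def collapseLoop (out : List String) (toks : List String) : List String :=
  match toks with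
  | [] => out
  | x :: xs =>
    if PySem.Str.len x != 1 then collapseLoop (out ++ [x]) xs
    else
      let p := collapseSpan (x :: xs)
      collapseLoop (out ++ [PySem.Str.join "" p.1]) p.2
termination_by toks.length
decreasing_by
  · simp
  · simp only [collapseSpan]; split
    · simpa [Nat.lt_succ_iff] using collapseSpan_rest_le xs
    · simp_all

def collapseAbbrv_py_alt (_s : String) : List String :=
  collapseLoop [] ((PySem.Str.split? _s " ").getD [])

-- ===== PRECONDITION & SPEC =====
def Spec_collapseAbbrv_py (_s : String) (out : List String) : Prop := out = collapseAbbrv_py_alt _s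
instance (_s : String) (out : List String) : Decidable (Spec_collapseAbbrv_py _s out) := by unfold Spec_collapseAbbrv_py; infer_instance

-- ===== CLAIM (what is proved, stated in full; the proofs are below) =====
def Claim_equal_collapseAbbrv_py : Prop := ∀ (_s : String), Dom_collapseAbbrv_py _s → Spec_collapseAbbrv_py _s (collapseAbbrv_py _s)

-- ===== LEMMAS AND PROOFS =====


-- single-char token test shared by both programs (proof-side abbreviation)
def pvSingle (y : String) : Bool := PySem.Str.len y == 1

theorem pv_join_empty_nil : PySem.Str.join "" [] = "" := by
  apply String.ext
  simp [PySem.Str.toList_join, PySem.Chars.join_nil]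

theorem pv_join_empty_cons (x : String) (l : List String) :
    PySem.Str.join "" (x :: l) = x ++ PySem.Str.join "" l := by
  apply String.ext
  cases l with
  | nil =>
    simp [PySem.Str.toList_join, PySem.Chars.join_singleton, PySem.Chars.join_nil,
      String.toList_append]
  | cons y ys =>
    simp [PySem.Str.toList_join, PySem.Chars.join_cons_cons, String.toList_append]

theorem pv_len_zero (t : String) (h : t.length = 0) : t = "" := by
  apply String.ext
  have h2 : t.toList.length = 0 := by simpa using h
  simpa using List.length_eq_zero_iff.mp h2

theorem pv_span_eq (l : List String) :
    collapseSpan l = (l.takeWhile pvSingle, l.dropWhile pvSingle) := by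
  induction l with
  | nil => simp [collapseSpan]
  | cons x xs ih =>
    by_cases h : x.length = 1 <;> simp [collapseSpan, pvSingle, h, ih]

theorem pv_loop_out : ∀ (n : Nat) (toks : List String), toks.length ≤ n →
    ∀ (out : List String), collapseLoop out toks = out ++ collapseLoop [] toks
  | _, [], _, out => by simp [collapseLoop]
  | Nat.succ n, x :: xs, h, out => by
    by_cases hx : x.length = 1
    · have hrest : ((collapseSpan (x :: xs)).2).length ≤ n := by
        have hsp : (collapseSpan (x :: xs)).2 = List.dropWhile pvSingle xs := by
          rw [pv_span_eq]
          exact List.dropWhile_cons_of_pos (by simp [pvSingle, hx])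
        rw [hsp]
        have h2 := List.length_dropWhile_le (p := pvSingle) (l := xs)
        simp only [List.length_cons] at h
        omega
      rw [collapseLoop, if_neg (by simp [hx]), collapseLoop, if_neg (by simp [hx])]
      rw [pv_loop_out n _ hrest, pv_loop_out n _ hrest ([] ++ _)]
      simp
    · rw [collapseLoop, if_pos (by simp [hx]), collapseLoop, if_pos (by simp [hx])]
      have hn : xs.length ≤ n := by simpa using h
      rw [pv_loop_out n xs hn, pv_loop_out n xs hn ([] ++ [x])]
      simp

-- A's loop, written as a direct recursion over the token list with the pending string t
def loopA : List String → String → List String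
  | [], t => if PySem.Str.len t > 0 then [t] else []
  | x :: xs, t =>
    if PySem.Str.len x == 1 then loopA xs (t ++ x)
    else (if PySem.Str.len t > 0 then [t] else []) ++ x :: loopA xs ""

theorem pv_fold_eq : ∀ (toks : List String) (t : String) (acc : List String),
    (let st := toks.foldl
      (fun (p : String × List String) x =>
        if PySem.Str.len x == 1 then (p.1 ++ x, p.2)
        else if PySem.Str.len p.1 > 0 then ("", p.2 ++ [p.1] ++ [x])
        else (p.1, p.2 ++ [x])) (t, acc);
     if PySem.Str.len st.1 > 0 then st.2 ++ [st.1] else st.2)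
    = acc ++ loopA toks t := by
  intro toks
  induction toks with
  | nil =>
    intro t acc
    simp only [List.foldl_nil, loopA]
    split <;> simp
  | cons x xs ih =>
    intro t acc
    simp only [List.foldl_cons]
    by_cases h1 : x.length = 1
    · simpa [h1, loopA] using ih (t ++ x) acc
    · by_cases h2 : 0 < t.length
      · simpa [h1, h2, loopA, List.append_assoc] using ih "" (acc ++ [t] ++ [x])
      · have ht : t = "" := pv_len_zero t (by omega)
        subst ht
        simpa [h1, loopA] using ih "" (acc ++ [x])

theorem pv_loopA_eq : ∀ (toks : List String) (t : String),
    loopA toks t =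
      if 0 < t.length then
        (t ++ PySem.Str.join "" (toks.takeWhile pvSingle))
          :: collapseLoop [] (toks.dropWhile pvSingle)
      else collapseLoop [] toks := by
  intro toks
  induction toks with
  | nil =>
    intro t
    by_cases h : 0 < t.length <;>
      simp [loopA, collapseLoop, h, pv_join_empty_nil, String.append_empty]
  | cons x xs ih =>
    intro t
    by_cases hx : x.length = 1
    · have hpv : pvSingle x = true := by simp [pvSingle, hx]
      have hlen : 0 < (t ++ x).length := by rw [String.length_append]; omega
      rw [loopA, if_pos (by simp [hx]), ih (t ++ x), if_pos (by simpa using hlen)]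
      by_cases h2 : 0 < t.length
      · rw [if_pos h2, List.takeWhile_cons_of_pos hpv, List.dropWhile_cons_of_pos hpv,
          pv_join_empty_cons, ← String.append_assoc]
      · have ht : t = "" := pv_len_zero t (by omega)
        have hsp1 : (collapseSpan (x :: xs)).1 = x :: List.takeWhile pvSingle xs := by
          rw [pv_span_eq]; exact List.takeWhile_cons_of_pos hpv
        have hsp2 : (collapseSpan (x :: xs)).2 = List.dropWhile pvSingle xs := by
          rw [pv_span_eq]; exact List.dropWhile_cons_of_pos hpv
        have hB : collapseLoop [] (x :: xs)
            = PySem.Str.join "" (x :: List.takeWhile pvSingle xs)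
              :: collapseLoop [] (List.dropWhile pvSingle xs) := by
          rw [collapseLoop, if_neg (by simp [hx])]
          show collapseLoop ([] ++ [PySem.Str.join "" (collapseSpan (x :: xs)).1])
              (collapseSpan (x :: xs)).2 = _
          rw [hsp1, hsp2, pv_loop_out (List.dropWhile pvSingle xs).length _ le_rfl]
          simp
        rw [if_neg h2, ht, String.empty_append, hB, pv_join_empty_cons]
    · have hpv : pvSingle x = false := by simp [pvSingle, hx]
      have hB : collapseLoop [] (x :: xs) = x :: collapseLoop [] xs := by
        rw [collapseLoop, if_pos (by simp [hx])]
        rw [pv_loop_out xs.length xs le_rfl]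
        simp
      have hxs : loopA xs "" = collapseLoop [] xs := by
        rw [ih ""]; simp
      rw [loopA, if_neg (by simp [hx]), hxs]
      by_cases h2 : 0 < t.length
      · rw [if_pos (by simpa using h2), if_pos h2,
          List.takeWhile_cons_of_neg (by simp [hpv]), List.dropWhile_cons_of_neg (by simp [hpv]),
          pv_join_empty_nil, String.append_empty, hB]
        simp
      · rw [if_neg (by simpa using h2), if_neg h2, hB]
        simp

-- ===== VERDICT (by name: the statement is the Claim_ definition above) =====
theorem collapseAbbrv_py_spec : Claim_equal_collapseAbbrv_py := by
  intro s _
  unfold Spec_collapseAbbrv_py collapseAbbrv_py collapseAbbrv_py_alt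
  rw [pv_fold_eq, pv_loopA_eq]
  simp
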